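-- pv_equiv track=rewrite | github.com/Muhammad-Saaaad/Health-FHIR-HL7-Processing-Engine-with-client-Simulator | LIS/api/engine_service.py | hl7_extract_paths
-- ===== SOURCE A (Python) =====
-- def hl7_extract_paths(segment) -> tuple[str, list[str]]:
--     """
--     Parse a single HL7 segment string and return all field/component/subcomponent paths.
--
--     Generates dot-notation path strings such as:
--     - `PID-3` for a simple field
--     - `PID-5.1` for the first component within a field (split by `^`)
--     - `PID-5.1.2` for a subcomponent (split by `&`)
--
--     Args:
--         segment (str): A single HL7 v2.x segment string (e.g., "PID|1||12345^^^MR||Smith^John").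
--
--     Returns:
--         tuple: (segment_type: str, paths: list[str])
--             - `segment_type`: The segment identifier (e.g., "PID").
--             - `paths`: List of all non-empty path strings found in the segment.
--     """
--     paths = []
--
--     # for segment in segments[1:]:
--     fields = segment.split('|')
--     segment_type = fields[0] # PID etc.
--     for i , field in enumerate(fields[1:], start=1):
--         if field == '':
--             continue
--         if '^' in field:
--             components = field.split('^')
--             for j, component in enumerate(components, start=1):
--                 if '&' in component:
--                     subcomponents = component.split('&')
--                     for k, subcomponent in enumerate(subcomponents, start=1):
--                         path = f"{segment_type}-{i}.{j}.{k}"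
--                         paths.append(path)
--                 else:
--                     path = f"{segment_type}-{i}.{j}"
--                     paths.append(path)
--         else:
--             path = f"{segment_type}-{i}"
--             paths.append(path)
--     return (segment_type, paths)
-- ===== SOURCE B (Python) =====
-- def hl7_extract_paths(segment) -> tuple[str, list[str]]:
--     """Recursive-descent re-implementation: one generic helper walks the
--     delimiter hierarchy ['^', '&'] instead of three hand-written nested loops."""
--     fields = segment.split('|')
--     segment_type = fields[0]
--     paths = []
--     for i, field in enumerate(fields[1:], start=1):
--         if field == '':
--             continue
--         _walk(field, ['^', '&'], f"{segment_type}-{i}", paths)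
--     return (segment_type, paths)
--
--
-- def _walk(s, delims, prefix, out):
--     if not delims or delims[0] not in s:
--         out.append(prefix)
--     else:
--         for j, piece in enumerate(s.split(delims[0]), start=1):
--             _walk(piece, delims[1:], f"{prefix}.{j}", out)
-- ===== Notes on version B (the rewrite author's own statement) =====
-- stated objective: simpler
-- what changed: Replaced the three hand-written nested split/enumerate loops by a single generic recursive helper that walks the delimiter hierarchy ['^','&'] with an accumulated path prefix.
import Mathlib
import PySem

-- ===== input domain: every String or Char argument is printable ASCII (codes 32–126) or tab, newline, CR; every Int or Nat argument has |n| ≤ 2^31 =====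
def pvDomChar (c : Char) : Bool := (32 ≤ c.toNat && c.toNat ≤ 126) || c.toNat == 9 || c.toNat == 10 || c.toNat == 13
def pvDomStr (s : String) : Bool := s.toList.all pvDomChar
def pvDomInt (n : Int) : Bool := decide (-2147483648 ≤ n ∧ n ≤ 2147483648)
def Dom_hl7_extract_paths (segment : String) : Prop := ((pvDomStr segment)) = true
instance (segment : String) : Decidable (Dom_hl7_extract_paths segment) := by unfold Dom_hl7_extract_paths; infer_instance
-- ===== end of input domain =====

-- B replaces A's three hand-written nested split/enumerate loops by one generic
-- recursive helper walking the delimiter hierarchy ['^','&'] with a path prefix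
-- (objective: simpler decomposition, same cost).

-- ===== PORT A =====
-- Literal port of A; strings are handled as List Char via PySem.Chars, the
-- f-strings become explicit List Char concatenations.
def hl7_extract_paths (segment : String) : String × List String :=
  let fields := PySem.Chars.splitOn segment.toList ['|']
  -- fields[0]: split with a non-empty separator never returns an empty list,
  -- so Python's fields[0] cannot raise; headD is exact here.
  let segment_type := fields.headD []
  let paths := (PySem.List.enumerate (fields.drop 1) 1).foldl (fun paths p =>
    let i := p.1
    let field := p.2
    if field = [] then paths
    else if PySem.Chars.isIn ['^'] field then
      (PySem.List.enumerate (PySem.Chars.splitOn field ['^']) 1).foldl (fun paths q =>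
        let j := q.1
        let component := q.2
        if PySem.Chars.isIn ['&'] component then
          (PySem.List.enumerate (PySem.Chars.splitOn component ['&']) 1).foldl (fun paths r =>
            paths ++ [segment_type ++ ['-'] ++ PySem.Int.toChars i ++ ['.'] ++
                      PySem.Int.toChars j ++ ['.'] ++ PySem.Int.toChars r.1]) paths
        else
          paths ++ [segment_type ++ ['-'] ++ PySem.Int.toChars i ++ ['.'] ++ PySem.Int.toChars j]) paths
    else
      paths ++ [segment_type ++ ['-'] ++ PySem.Int.toChars i]) []
  (String.ofList segment_type, paths.map String.ofList)

-- ===== PORT B =====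
-- _walk: Python appends to `out`; ported as returning the appended suffix,
-- concatenated by the caller (out ++ walk …), which is the same list.
def hl7Walk (s : List Char) (delims : List (List Char)) (pre : List Char) : List (List Char) :=
  match delims with
  | [] => [pre]
  | d :: rest =>
    if PySem.Chars.isIn d s then
      (PySem.List.enumerate (PySem.Chars.splitOn s d) 1).foldl
        (fun out p => out ++ hl7Walk p.2 rest (pre ++ ['.'] ++ PySem.Int.toChars p.1)) []
    else [pre]

def hl7_extract_paths_alt (segment : String) : String × List String :=
  let fields := PySem.Chars.splitOn segment.toList ['|']
  let segment_type := fields.headD []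
  let paths := (PySem.List.enumerate (fields.drop 1) 1).foldl (fun out p =>
    if p.2 = [] then out
    else out ++ hl7Walk p.2 [['^'], ['&']] (segment_type ++ ['-'] ++ PySem.Int.toChars p.1)) []
  (String.ofList segment_type, paths.map String.ofList)

-- ===== PRECONDITION & SPEC =====
def Spec_hl7_extract_paths (segment : String) (out : String × List String) : Prop := out = hl7_extract_paths_alt segment
instance (segment : String) (out : String × List String) : Decidable (Spec_hl7_extract_paths segment out) := by unfold Spec_hl7_extract_paths; infer_instance

-- ===== CLAIM (what is proved, stated in full; the proofs are below) =====
def Claim_equal_hl7_extract_paths : Prop := ∀ (segment : String), Dom_hl7_extract_paths segment → Spec_hl7_extract_paths segment (hl7_extract_paths segment)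

-- ===== LEMMAS AND PROOFS =====

-- A's per-field block equals B's recursive walk over ['^','&']
theorem hl7Walk_field (field pre : List Char) (paths : List (List Char)) :
    (if PySem.Chars.isIn ['^'] field then
      (PySem.List.enumerate (PySem.Chars.splitOn field ['^']) 1).foldl (fun paths q =>
        if PySem.Chars.isIn ['&'] q.2 then
          (PySem.List.enumerate (PySem.Chars.splitOn q.2 ['&']) 1).foldl (fun paths r =>
            paths ++ [pre ++ ['.'] ++ PySem.Int.toChars q.1 ++ ['.'] ++ PySem.Int.toChars r.1]) paths
        else
          paths ++ [pre ++ ['.'] ++ PySem.Int.toChars q.1]) paths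
    else paths ++ [pre])
    = paths ++ hl7Walk field [['^'], ['&']] pre := by
  unfold hl7Walk
  by_cases h1 : PySem.Chars.isIn ['^'] field = true
  · simp only [h1, if_pos]
    rw [PySem.List.foldl_append_eq_flatMap]
    have : ∀ (acc : List (List Char)) (q : Int × List Char),
        q ∈ PySem.List.enumerate (PySem.Chars.splitOn field ['^']) 1 →
        (if PySem.Chars.isIn ['&'] q.2 then
          (PySem.List.enumerate (PySem.Chars.splitOn q.2 ['&']) 1).foldl (fun paths r =>
            paths ++ [pre ++ ['.'] ++ PySem.Int.toChars q.1 ++ ['.'] ++ PySem.Int.toChars r.1]) acc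
        else acc ++ [pre ++ ['.'] ++ PySem.Int.toChars q.1])
        = acc ++ hl7Walk q.2 [['&']] (pre ++ ['.'] ++ PySem.Int.toChars q.1) := by
      intro acc q _
      unfold hl7Walk
      by_cases h2 : PySem.Chars.isIn ['&'] q.2 = true
      · simp only [h2, if_pos]
        rw [PySem.List.foldl_append_eq_flatMap]
        congr 1
        rw [PySem.List.foldl_append_eq_flatMap, List.nil_append]
        apply List.flatMap_congr
        intro r _
        simp [hl7Walk, List.append_assoc]
      · simp [h2]
    rw [PySem.List.foldl_congr_mem (g := fun acc q =>
          acc ++ hl7Walk q.2 [['&']] (pre ++ ['.'] ++ PySem.Int.toChars q.1))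
        (h := fun acc q hq => this acc q hq)]
    rw [PySem.List.foldl_append_eq_flatMap]
    simp
  · simp [h1]

-- the two top-level folds agree field by field
theorem hl7_folds_eq (xs : List (Int × List Char)) (seg : List Char)
    (paths : List (List Char)) :
    xs.foldl (fun paths p =>
      if p.2 = [] then paths
      else if PySem.Chars.isIn ['^'] p.2 then
        (PySem.List.enumerate (PySem.Chars.splitOn p.2 ['^']) 1).foldl (fun paths q =>
          if PySem.Chars.isIn ['&'] q.2 then
            (PySem.List.enumerate (PySem.Chars.splitOn q.2 ['&']) 1).foldl (fun paths r =>
              paths ++ [seg ++ ['-'] ++ PySem.Int.toChars p.1 ++ ['.'] ++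
                        PySem.Int.toChars q.1 ++ ['.'] ++ PySem.Int.toChars r.1]) paths
          else
            paths ++ [seg ++ ['-'] ++ PySem.Int.toChars p.1 ++ ['.'] ++ PySem.Int.toChars q.1]) paths
      else
        paths ++ [seg ++ ['-'] ++ PySem.Int.toChars p.1]) paths
    = xs.foldl (fun out p =>
        if p.2 = [] then out
        else out ++ hl7Walk p.2 [['^'], ['&']] (seg ++ ['-'] ++ PySem.Int.toChars p.1)) paths := by
  apply PySem.List.foldl_congr_mem
  intro acc p _
  by_cases h0 : p.2 = []
  · simp [h0]
  · simp only [h0, if_false]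
    have := hl7Walk_field p.2 (seg ++ ['-'] ++ PySem.Int.toChars p.1) acc
    simp only [List.append_assoc] at this ⊢
    exact this

-- ===== VERDICT (by name: the statement is the Claim_ definition above) =====
theorem hl7_extract_paths_spec : Claim_equal_hl7_extract_paths := by
  intro segment _
  unfold Spec_hl7_extract_paths hl7_extract_paths hl7_extract_paths_alt
  simp only []
  rw [hl7_folds_eq]
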